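-- pv_equiv track=rewrite | github.com/wangyang581/uav | src/utils.py | id_in_list
-- ===== SOURCE A (Python) =====
-- def id_in_list(ids, lists):
--     for i in range(0, len(ids)):
--         a = 0
--         for j in range(0, len(lists)):
--             if ids[i] in lists[j]:
--                 a += 1
--         if a >= len(lists):
--             return True
--
--     return False
-- ===== SOURCE B (Python) =====
-- def id_in_list(ids, lists):
--     counts = {}
--     for sub in lists:
--         for x in set(sub):
--             counts[x] = counts.get(x, 0) + 1
--     n = len(lists)
--     for x in ids:
--         if counts.get(x, 0) >= n:
--             return True
--     return False
-- ===== Notes on version B (the rewrite author's own statement) =====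
-- stated objective: faster
-- what changed: B builds a frequency dict (number of sublists containing each element, via per-sublist sets) in one pass, then answers with a single lookup pass over ids, instead of A's per-id rescan of every sublist.
import Mathlib
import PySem

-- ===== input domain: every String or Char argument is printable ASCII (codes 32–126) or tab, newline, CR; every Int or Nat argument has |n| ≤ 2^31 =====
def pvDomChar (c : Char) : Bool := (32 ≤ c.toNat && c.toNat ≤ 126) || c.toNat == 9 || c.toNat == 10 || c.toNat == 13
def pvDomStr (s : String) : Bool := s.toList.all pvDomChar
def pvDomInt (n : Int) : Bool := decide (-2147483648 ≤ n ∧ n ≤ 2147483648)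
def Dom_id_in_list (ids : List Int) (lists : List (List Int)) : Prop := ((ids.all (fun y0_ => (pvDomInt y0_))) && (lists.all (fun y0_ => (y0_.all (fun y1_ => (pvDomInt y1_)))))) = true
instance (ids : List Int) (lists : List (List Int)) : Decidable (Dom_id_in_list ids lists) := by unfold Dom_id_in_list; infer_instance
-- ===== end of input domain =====

-- B replaces A's per-id rescans of all sublists by a frequency dict built once (distinct
-- elements per sublist) plus a single lookup pass over the ids (objective: faster).

-- ===== PORT A =====
-- outer loop over ids; for each id, count (a) the sublists containing it, return True if a >= len(lists)
def idLoopA (lists : List (List Int)) : List Int → Bool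
  | [] => false
  | x :: rest =>
    let a : Int := lists.foldl (fun a sub => if sub.contains x then a + 1 else a) 0
    if a ≥ (lists.length : Int) then true else idLoopA lists rest

def id_in_list (ids : List Int) (lists : List (List Int)) : Bool :=
  idLoopA lists ids

-- ===== PORT B =====
-- counts[x] = number of sublists whose set of elements contains x
def countsB (lists : List (List Int)) : PySem.Dict Int Int :=
  lists.foldl
    (fun d sub => (PySem.Set.ofList sub).foldl (fun d x => d.modify x 0 (· + 1)) d)
    PySem.Dict.empty

-- second pass: return True on the first id whose count reaches len(lists)
def queryLoopB (counts : PySem.Dict Int Int) (n : Int) : List Int → Bool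
  | [] => false
  | x :: rest => if counts.getD x 0 ≥ n then true else queryLoopB counts n rest

def id_in_list_alt (ids : List Int) (lists : List (List Int)) : Bool :=
  queryLoopB (countsB lists) (lists.length : Int) ids

-- ===== PRECONDITION & SPEC =====
def Spec_id_in_list (ids : List Int) (lists : List (List Int)) (out : Bool) : Prop := out = id_in_list_alt ids lists
instance (ids : List Int) (lists : List (List Int)) (out : Bool) : Decidable (Spec_id_in_list ids lists out) := by unfold Spec_id_in_list; infer_instance

-- ===== CLAIM (what is proved, stated in full; the proofs are below) =====
def Claim_equal_id_in_list : Prop := ∀ (ids : List Int) (lists : List (List Int)), Dom_id_in_list ids lists → Spec_id_in_list ids lists (id_in_list ids lists)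

-- ===== LEMMAS AND PROOFS =====

-- A's inner counter counts the sublists containing x
theorem foldlA_count (x : Int) (lists : List (List Int)) (c : Int) :
    lists.foldl (fun a sub => if sub.contains x then a + 1 else a) c
      = c + ((lists.countP (fun sub => sub.contains x) : Nat) : Int) := by
  induction lists generalizing c with
  | nil => simp
  | cons s t ih =>
    simp only [List.foldl_cons, List.countP_cons, ih]
    split_ifs with h <;> first | (simp; ring) | simp

-- a set's count of x is 1 or 0 by membership
theorem count_ofList (x : Int) (sub : List Int) :
    (PySem.Set.ofList sub).count x = if sub.contains x then 1 else 0 := by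
  by_cases h : x ∈ sub
  · rw [if_pos (by simpa using h)]
    exact List.count_eq_one_of_mem (PySem.Set.nodup_ofList sub) (by simpa [PySem.Set.mem_ofList] using h)
  · rw [if_neg (by simpa using h)]
    exact List.count_eq_zero.mpr (by simpa [PySem.Set.mem_ofList] using h)

-- B's dict assigns each x the number of sublists containing it
theorem countsB_getD (x : Int) (lists : List (List Int)) (d : PySem.Dict Int Int) :
    (lists.foldl
      (fun d sub => (PySem.Set.ofList sub).foldl (fun d x => d.modify x 0 (· + 1)) d)
      d).getD x 0
      = d.getD x 0 + ((lists.countP (fun sub => sub.contains x) : Nat) : Int) := by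
  induction lists generalizing d with
  | nil => simp
  | cons s t ih =>
    simp only [List.foldl_cons, List.countP_cons, ih,
      PySem.Dict.getD_foldl_modify_add_one, count_ofList]
    split_ifs with h <;> first | (simp; ring) | simp

-- the two scans over ids agree pointwise, hence agree
theorem loops_agree (lists : List (List Int)) (ids : List Int) :
    idLoopA lists ids = queryLoopB (countsB lists) (lists.length : Int) ids := by
  induction ids with
  | nil => rfl
  | cons x rest ih =>
    simp only [idLoopA, queryLoopB, foldlA_count, countsB, countsB_getD, ih]
    rfl

-- ===== VERDICT (by name: the statement is the Claim_ definition above) =====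
theorem id_in_list_spec : Claim_equal_id_in_list := by
  intro ids lists _
  unfold Spec_id_in_list id_in_list id_in_list_alt
  exact loops_agree lists ids
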